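-- pv_equiv track=rewrite | github.com/khrazy5150/stripe-cart | src/upsell_processor.py | _select_secret
-- ===== SOURCE A (Python) =====
-- def _select_secret(keys: dict) -> str:
--     # prefer platform secret (Connect platform)
--     for n in ("platform_secret_key", "platform_sk", "platform_secret"):
--         v = keys.get(n)
--         if isinstance(v, str) and v.strip():
--             return v.strip()
--     mode = (keys.get("mode") or "").lower()
--     if mode == "live":
--         for n in ("live_secret_key", "live_sk"):
--             v = keys.get(n)
--             if isinstance(v, str) and v.strip():
--                 return v.strip()
--     if mode == "test":
--         for n in ("test_secret_key", "test_sk"):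
--             v = keys.get(n)
--             if isinstance(v, str) and v.strip():
--                 return v.strip()
--     for n in ("secret_key", "sk"):
--         v = keys.get(n)
--         if isinstance(v, str) and v.strip():
--             return v.strip()
--     return ""
-- ===== SOURCE B (Python) =====
-- def _select_secret(keys: dict) -> str:
--     # Single pass over the dict items with a precedence-rank table and a
--     # running-minimum accumulator, instead of scanning candidate names.
--     mode = (keys.get("mode") or "").lower()
--     rank = {"platform_secret_key": 0, "platform_sk": 1, "platform_secret": 2}
--     if mode == "live":
--         rank.update({"live_secret_key": 3, "live_sk": 4})
--     elif mode == "test":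
--         rank.update({"test_secret_key": 3, "test_sk": 4})
--     rank.update({"secret_key": 5, "sk": 6})
--     best = ""
--     best_r = None
--     for k, v in keys.items():
--         r = rank.get(k)
--         if r is not None and isinstance(v, str) and v.strip() and (best_r is None or r < best_r):
--             best_r, best = r, v.strip()
--     return best
-- ===== Notes on version B (the rewrite author's own statement) =====
-- stated objective: alternative
-- what changed: Instead of A's ordered scans over fixed candidate names via keys.get, B builds a name-to-precedence rank table once and makes a single pass over the dict's own items, keeping the stripped value of the minimum-rank valid entry.
import Mathlib
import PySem

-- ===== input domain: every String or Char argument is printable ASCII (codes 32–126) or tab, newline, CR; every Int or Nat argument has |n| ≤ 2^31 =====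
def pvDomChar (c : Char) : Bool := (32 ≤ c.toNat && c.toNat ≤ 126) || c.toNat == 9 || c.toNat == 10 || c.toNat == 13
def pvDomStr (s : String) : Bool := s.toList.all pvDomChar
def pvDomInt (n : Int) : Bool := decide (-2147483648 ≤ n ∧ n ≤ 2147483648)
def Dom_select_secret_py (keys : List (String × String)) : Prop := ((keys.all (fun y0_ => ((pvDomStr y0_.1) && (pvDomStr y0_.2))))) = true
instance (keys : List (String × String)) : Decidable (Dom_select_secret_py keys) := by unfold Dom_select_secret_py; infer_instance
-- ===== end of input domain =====

-- B replaces A's ordered scans over candidate names by a single pass over the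
-- dict's items with a precedence-rank table and a running-minimum accumulator
-- (objective: alternative).

-- ===== PORT A =====
-- each 'for n in (…): v = keys.get(n); if … return v.strip()' loop of A
def aLoop (d : PySem.Dict String String) : List String → Option String
  | [] => none
  | n :: rest =>
    match d.get? n with
    | some v => if PySem.Str.strip v ≠ "" then some (PySem.Str.strip v) else aLoop d rest
    | none => aLoop d rest

def select_secret_py (keys : List (String × String)) : String :=
  let d := PySem.Dict.ofList keys
  match aLoop d ["platform_secret_key", "platform_sk", "platform_secret"] with
  | some r => r
  | none =>
    let mode := PySem.Str.lower ((d.get? "mode").getD "")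
    match (if mode == "live" then aLoop d ["live_secret_key", "live_sk"] else none) with
    | some r => r
    | none =>
      match (if mode == "test" then aLoop d ["test_secret_key", "test_sk"] else none) with
      | some r => r
      | none => (aLoop d ["secret_key", "sk"]).getD ""

-- ===== PORT B =====
-- the rank dict built by Source B ('rank = {…}; rank.update(…); rank.update(…)')
def rankDict (mode : String) : PySem.Dict String Int :=
  let r := PySem.Dict.ofList [("platform_secret_key", 0), ("platform_sk", 1), ("platform_secret", 2)]
  let r := if mode == "live" then r.update [("live_secret_key", 3), ("live_sk", 4)]
           else if mode == "test" then r.update [("test_secret_key", 3), ("test_sk", 4)]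
           else r
  r.update [("secret_key", 5), ("sk", 6)]

-- body of Source B's 'for k, v in keys.items():' loop; state = (best, best_r)
def bStep (rank : PySem.Dict String Int) (st : String × Option Int) (kv : String × String) : String × Option Int :=
  match rank.get? kv.1 with
  | none => st
  | some r =>
    if (PySem.Str.strip kv.2 != "") && (match st.2 with | none => true | some br => decide (r < br))
    then (PySem.Str.strip kv.2, some r) else st

def select_secret_py_alt (keys : List (String × String)) : String :=
  let d := PySem.Dict.ofList keys
  let mode := PySem.Str.lower ((d.get? "mode").getD "")
  let rank := rankDict mode
  (d.items.foldl (bStep rank) ("", none)).1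

-- ===== PRECONDITION & SPEC =====
def Spec_select_secret_py (keys : List (String × String)) (out : String) : Prop := out = select_secret_py_alt keys
instance (keys : List (String × String)) (out : String) : Decidable (Spec_select_secret_py keys out) := by unfold Spec_select_secret_py; infer_instance

-- ===== CLAIM (what is proved, stated in full; the proofs are below) =====
def Claim_equal_select_secret_py : Prop := ∀ (keys : List (String × String)), Dom_select_secret_py keys → Spec_select_secret_py keys (select_secret_py keys)

-- ===== LEMMAS AND PROOFS =====

-- first name in ns whose value in d is a non-blank string, stripped; else ""
def bScan (d : PySem.Dict String String) : List String → String
  | [] => ""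
  | n :: rest =>
    match d.get? n with
    | some v =>
      let s := PySem.Str.strip v
      if s ≠ "" then s else bScan d rest
    | none => bScan d rest

-- the full precedence-ordered candidate-name list A consults
def aCandidates (mode : String) : List String :=
  ["platform_secret_key", "platform_sk", "platform_secret"]
    ++ (if mode == "live" then ["live_secret_key", "live_sk"]
        else if mode == "test" then ["test_secret_key", "test_sk"] else [])
    ++ ["secret_key", "sk"]

-- first-match association lookup, same shape as Dict.get? on a literal
def lookupA (ps : List (String × Int)) (k : String) : Option Int :=
  match ps with
  | [] => none
  | p :: t => if p.1 == k then some p.2 else lookupA t k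

-- the entry of minimal rank among valid (non-blank, ranked) entries, earliest on ties
def bestOfF (f : String → Option Int) : List (String × String) → Option (String × Int)
  | [] => none
  | (k, v) :: t =>
    let rest := bestOfF f t
    match f k with
    | none => rest
    | some r =>
      if PySem.Str.strip v ≠ "" then
        match rest with
        | none => some (PySem.Str.strip v, r)
        | some (s', r') => if r ≤ r' then some (PySem.Str.strip v, r) else some (s', r')
      else rest

theorem bScan_append (d : PySem.Dict String String) (l1 l2 : List String) :
    bScan d (l1 ++ l2) = match aLoop d l1 with
      | some r => r
      | none => bScan d l2 := by
  induction l1 with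
  | nil => simp [aLoop]
  | cons n rest ih =>
    simp only [List.cons_append, bScan, aLoop]
    cases d.get? n with
    | none => exact ih
    | some v =>
      by_cases h : PySem.Str.strip v = "" <;> simp [h, ih]

theorem bScan_pair (d : PySem.Dict String String) (a b : String) :
    bScan d [a, b] = (aLoop d [a, b]).getD "" := by
  simp only [bScan, aLoop]
  cases d.get? a <;> cases d.get? b <;>
    simp <;> split_ifs <;> simp_all

-- A's three interleaved guarded loops scan exactly aCandidates mode in order
theorem A_eq_bScan (keys : List (String × String)) :
    select_secret_py keys =
      bScan (PySem.Dict.ofList keys)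
        (aCandidates (PySem.Str.lower (((PySem.Dict.ofList keys).get? "mode").getD ""))) := by
  unfold select_secret_py aCandidates
  dsimp only
  generalize PySem.Dict.ofList keys = d
  generalize PySem.Str.lower ((d.get? "mode").getD "") = mode
  rw [List.append_assoc, bScan_append]
  cases h1 : aLoop d ["platform_secret_key", "platform_sk", "platform_secret"] with
  | some r => simp only
  | none =>
    simp only
    by_cases hl : mode = "live"
    · simp only [hl, beq_self_eq_true, if_true]
      rw [bScan_append]
      cases h2 : aLoop d ["live_secret_key", "live_sk"] with
      | some r => simp
      | none => simp [bScan_pair]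
    · by_cases ht : mode = "test"
      · simp only [ht, beq_self_eq_true, if_true, beq_iff_eq]
        rw [bScan_append]
        cases h3 : aLoop d ["test_secret_key", "test_sk"] with
        | some r => simp [h3]
        | none => simp [h3, bScan_pair]
      · simp [hl, ht, bScan_pair]

-- B's fold computes bestOfF of the item list
theorem fold_char (rank : PySem.Dict String Int) (L : List (String × String)) :
    ∀ st : String × Option Int,
      L.foldl (bStep rank) st =
        match bestOfF rank.get? L, st.2 with
        | none, _ => st
        | some (s, r), none => (s, some r)
        | some (s, r), some r0 => if r < r0 then (s, some r) else st := by
  induction L with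
  | nil => intro st; rfl
  | cons kv t ih =>
    intro st
    obtain ⟨k, v⟩ := kv
    simp only [List.foldl_cons, bestOfF, bStep]
    cases hf : rank.get? k with
    | none => exact ih st
    | some r =>
      simp only
      by_cases hs : PySem.Str.strip v = ""
      · have hc : (PySem.Str.strip v != "" &&
            match st.2 with
            | none => true
            | some br => decide (r < br)) = false := by rw [hs]; simp
        rw [hc]
        rw [if_neg (show ¬ (false = true) by simp)]
        rw [if_neg (not_not_intro hs)]
        exact ih st
      · have hs' : (PySem.Str.strip v != "") = true := by simp [hs]
        simp only [hs', Bool.true_and, ne_eq, hs, not_false_iff, if_pos]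
        obtain ⟨bs, br⟩ := st
        cases br with
        | none =>
          simp only [if_pos]
          rw [ih]
          cases hb : bestOfF rank.get? t with
          | none => simp
          | some p =>
            obtain ⟨s', r'⟩ := p
            by_cases hrr : r ≤ r'
            · simp [hrr, not_lt.mpr hrr]
            · simp [hrr, lt_of_not_ge hrr]
        | some r0 =>
          by_cases hr0 : r < r0
          · simp only [hr0, decide_true, if_pos]
            rw [ih]
            cases hb : bestOfF rank.get? t with
            | none => simp [hr0]
            | some p =>
              obtain ⟨s', r'⟩ := p
              by_cases hrr : r ≤ r'
              · simp [hrr, not_lt.mpr hrr, hr0]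
              · have h1 : r' < r := lt_of_not_ge hrr
                simp [hrr, h1, lt_trans h1 hr0]
          · simp only [hr0, decide_false, if_neg, Bool.false_eq_true, if_false]
            rw [ih]
            cases hb : bestOfF rank.get? t with
            | none => simp [hr0]
            | some p =>
              obtain ⟨s', r'⟩ := p
              by_cases hrr : r ≤ r'
              · have hnr : ¬ r' < r0 := fun h => hr0 (lt_of_le_of_lt hrr h)
                simp [hrr, hnr, hr0]
              · simp [hrr]


theorem bestOfF_some (f : String → Option Int) (L : List (String × String)) (s : String) (r : Int)
    (h : bestOfF f L = some (s, r)) :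
    ∃ k v, (k, v) ∈ L ∧ f k = some r ∧ PySem.Str.strip v = s ∧ s ≠ "" := by
  induction L with
  | nil => simp only [bestOfF] at h; exact absurd h (by simp)
  | cons kv t ih =>
    obtain ⟨k, v⟩ := kv
    simp only [bestOfF] at h
    cases hf : f k with
    | none =>
      rw [hf] at h
      obtain ⟨k', v', hm, h1, h2, h3⟩ := ih h
      exact ⟨k', v', List.mem_cons_of_mem _ hm, h1, h2, h3⟩
    | some r1 =>
      rw [hf] at h
      simp only at h
      by_cases hs : PySem.Str.strip v ≠ ""
      · rw [if_pos hs] at h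
        cases hb : bestOfF f t with
        | none =>
          rw [hb] at h
          simp only at h
          simp only [Option.some.injEq, Prod.mk.injEq] at h
          exact ⟨k, v, List.mem_cons_self, by rw [hf, h.2], h.1, h.1 ▸ hs⟩
        | some p =>
          obtain ⟨s', r'⟩ := p
          rw [hb] at h
          simp only at h
          by_cases hrr : r1 ≤ r'
          · rw [if_pos hrr] at h
            simp only [Option.some.injEq, Prod.mk.injEq] at h
            exact ⟨k, v, List.mem_cons_self, by rw [hf, h.2], h.1, h.1 ▸ hs⟩
          · rw [if_neg hrr] at h
            obtain ⟨k', v', hm, h1, h2, h3⟩ := ih (by rw [hb, h])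
            exact ⟨k', v', List.mem_cons_of_mem _ hm, h1, h2, h3⟩
      · rw [if_neg hs] at h
        obtain ⟨k', v', hm, h1, h2, h3⟩ := ih h
        exact ⟨k', v', List.mem_cons_of_mem _ hm, h1, h2, h3⟩

theorem bestOfF_le (f : String → Option Int) (L : List (String × String)) (k : String) (v : String) (r : Int)
    (hm : (k, v) ∈ L) (hf : f k = some r) (hs : PySem.Str.strip v ≠ "") :
    ∃ s' r', bestOfF f L = some (s', r') ∧ r' ≤ r := by
  induction L with
  | nil => simp at hm
  | cons kv t ih =>
    obtain ⟨k1, v1⟩ := kv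
    rcases List.mem_cons.mp hm with heq | hmt
    · obtain ⟨hk, hv⟩ := Prod.mk.injEq .. ▸ heq
      subst hk; subst hv
      cases hb : bestOfF f t with
      | none => exact ⟨PySem.Str.strip v, r, by simp [bestOfF, hf, hs, hb], le_refl r⟩
      | some p =>
        obtain ⟨s', r'⟩ := p
        by_cases hrr : r ≤ r'
        · exact ⟨PySem.Str.strip v, r, by simp [bestOfF, hf, hs, hb, hrr], le_refl r⟩
        · exact ⟨s', r', by simp [bestOfF, hf, hs, hb, hrr], le_of_not_ge hrr⟩
    · obtain ⟨s', r', hb, hle⟩ := ih hmt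
      cases hf1 : f k1 with
      | none => exact ⟨s', r', by simp [bestOfF, hf1, hb], hle⟩
      | some r1 =>
        by_cases hs1 : PySem.Str.strip v1 ≠ ""
        · by_cases hrr : r1 ≤ r'
          · exact ⟨PySem.Str.strip v1, r1, by simp [bestOfF, hf1, hb, hs1, hrr], le_trans hrr hle⟩
          · exact ⟨s', r', by simp [bestOfF, hf1, hb, hs1, hrr], hle⟩
        · exact ⟨s', r', by simp [bestOfF, hf1, hb, hs1], hle⟩

theorem bestOfF_congr (f g : String → Option Int) (L : List (String × String))
    (h : ∀ k v, (k, v) ∈ L → PySem.Str.strip v ≠ "" → f k = g k) :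
    bestOfF f L = bestOfF g L := by
  induction L with
  | nil => rfl
  | cons kv t ih =>
    obtain ⟨k, v⟩ := kv
    have ht : bestOfF f t = bestOfF g t :=
      ih fun k' v' hm hs => h k' v' (List.mem_cons_of_mem _ hm) hs
    by_cases hs : PySem.Str.strip v ≠ ""
    · have hk : f k = g k := h k v List.mem_cons_self hs
      simp only [bestOfF, hk, ht]
    · simp only [bestOfF, ht]
      cases f k <;> cases g k <;> simp [hs]

theorem lookupA_mem (ps : List (String × Int)) (k : String) (r : Int)
    (h : lookupA ps k = some r) : r ∈ ps.map Prod.snd := by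
  induction ps with
  | nil => simp [lookupA] at h
  | cons p t ih =>
    simp only [lookupA] at h
    by_cases hk : p.1 == k
    · simp only [hk, if_pos] at h
      simp [← Option.some.injEq .. |>.mp h]
    · simp only [hk, if_neg, if_false] at h
      simp [ih h]

-- the single min-rank pass over d.items returns A's first valid candidate
theorem bridge (d : PySem.Dict String String) (hd : d.keys.Nodup) :
    ∀ (ps : List (String × Int)) (f : String → Option Int),
      (∀ k, f k = lookupA ps k) →
      (ps.map Prod.snd).Pairwise (· < ·) →
      (match bestOfF f d.items with | none => "" | some (s, _) => s) = bScan d (ps.map Prod.fst) := by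
  intro ps
  induction ps with
  | nil =>
    intro f hf _
    have : bestOfF f d.items = none := by
      induction d.items with
      | nil => rfl
      | cons kv t ih => obtain ⟨k, v⟩ := kv; simp only [bestOfF, hf k, lookupA, ih]
    simp [this, bScan]
  | cons p t ih =>
    obtain ⟨n, r⟩ := p
    intro f hf hincr
    have hfn : f n = some r := by simp [hf, lookupA]
    have hgt : ∀ r' ∈ t.map Prod.snd, r < r' := by
      have := (List.pairwise_cons.mp hincr).1
      simpa using this
    by_cases hvalid : ∃ v, d.get? n = some v ∧ PySem.Str.strip v ≠ ""
    · obtain ⟨v, hget, hs⟩ := hvalid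
      have hmem : (n, v) ∈ d.items := PySem.Dict.mem_items_of_get?_eq_some d hget
      obtain ⟨s', r', hb, hle⟩ := bestOfF_le f d.items n v r hmem hfn hs
      obtain ⟨k', v', hm', hf', hsv', hne'⟩ := bestOfF_some f d.items s' r' hb
      have hk' : k' = n := by
        by_contra hkn
        have : lookupA ((n, r) :: t) k' = some r' := by rw [← hf k', hf']
        simp only [lookupA] at this
        rw [if_neg (by simpa [beq_iff_eq] using fun h => hkn h.symm)] at this
        have := lookupA_mem t k' r' this
        exact absurd hle (not_le.mpr (hgt r' this))
      subst hk'
      have hv' : v' = v := by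
        have := PySem.Dict.get?_of_mem_items d hm' hd
        rw [hget] at this; exact (Option.some.injEq .. ▸ this).symm ▸ rfl
      subst hv'
      simp only [List.map_cons, bScan, hget, hb, hsv']
      simp [hs, hsv']
      exact fun h => absurd h hne'
    · push_neg at hvalid
      have hcongr : bestOfF f d.items = bestOfF (lookupA t) d.items := by
        apply bestOfF_congr
        intro k v hm hs
        rw [hf k]
        simp only [lookupA]
        rw [if_neg]
        simp only [beq_iff_eq]
        intro hk
        subst hk
        have := PySem.Dict.get?_of_mem_items d hm hd
        exact hs (hvalid v this)
      rw [hcongr]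
      have htail := ih (lookupA t) (fun _ => rfl) (List.pairwise_cons.mp hincr).2
      rw [htail]
      simp only [List.map_cons, bScan]
      cases hget : d.get? n with
      | none => rfl
      | some v =>
        have : PySem.Str.strip v = "" := by
          by_contra hs; exact hs (hvalid v hget)
        simp [this]

-- per-mode: the rank dict Source B builds is exactly lookupA of the candidate list paired with its positions
theorem rank_live (k : String) :
    (rankDict "live").get? k =
      lookupA [("platform_secret_key", 0), ("platform_sk", 1), ("platform_secret", 2),
               ("live_secret_key", 3), ("live_sk", 4), ("secret_key", 5), ("sk", 6)] k := by
  have h : rankDict "live" = PySem.Dict.mk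
      [("platform_secret_key", 0), ("platform_sk", 1), ("platform_secret", 2),
       ("live_secret_key", 3), ("live_sk", 4), ("secret_key", 5), ("sk", 6)] := by rfl
  rw [h]
  simp only [PySem.Dict.get?_mk_cons, lookupA]
  rfl

theorem rank_test (k : String) :
    (rankDict "test").get? k =
      lookupA [("platform_secret_key", 0), ("platform_sk", 1), ("platform_secret", 2),
               ("test_secret_key", 3), ("test_sk", 4), ("secret_key", 5), ("sk", 6)] k := by
  have h : rankDict "test" = PySem.Dict.mk
      [("platform_secret_key", 0), ("platform_sk", 1), ("platform_secret", 2),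
       ("test_secret_key", 3), ("test_sk", 4), ("secret_key", 5), ("sk", 6)] := by rfl
  rw [h]
  simp only [PySem.Dict.get?_mk_cons, lookupA]
  rfl

theorem rank_other (mode : String) (hl : mode ≠ "live") (ht : mode ≠ "test") (k : String) :
    (rankDict mode).get? k =
      lookupA [("platform_secret_key", 0), ("platform_sk", 1), ("platform_secret", 2),
               ("secret_key", 5), ("sk", 6)] k := by
  have h : rankDict mode = PySem.Dict.mk
      [("platform_secret_key", 0), ("platform_sk", 1), ("platform_secret", 2),
       ("secret_key", 5), ("sk", 6)] := by
    unfold rankDict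
    simp only [beq_iff_eq, hl, ht, if_false]
    rfl
  rw [h]
  simp only [PySem.Dict.get?_mk_cons, lookupA]
  rfl

theorem B_eq_bScan (keys : List (String × String)) :
    select_secret_py_alt keys =
      bScan (PySem.Dict.ofList keys)
        (aCandidates (PySem.Str.lower (((PySem.Dict.ofList keys).get? "mode").getD ""))) := by
  unfold select_secret_py_alt
  dsimp only
  have hd : (PySem.Dict.ofList keys).keys.Nodup := PySem.Dict.nodup_keys_ofList keys
  generalize hD : PySem.Dict.ofList keys = d at *
  generalize PySem.Str.lower ((d.get? "mode").getD "") = mode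
  rw [fold_char]
  by_cases hl : mode = "live"
  · have hb := bridge d hd
      [("platform_secret_key", 0), ("platform_sk", 1), ("platform_secret", 2),
       ("live_secret_key", 3), ("live_sk", 4), ("secret_key", 5), ("sk", 6)]
      ((rankDict mode).get?) (by rw [hl]; exact rank_live) (by decide)
    subst hl
    cases hB : bestOfF (rankDict "live").get? d.items with
    | none => rw [hB] at hb; simpa [aCandidates] using hb.symm ▸ rfl
    | some p => obtain ⟨s, r⟩ := p; rw [hB] at hb; simpa [aCandidates] using hb
  · by_cases ht : mode = "test"
    · have hb := bridge d hd
        [("platform_secret_key", 0), ("platform_sk", 1), ("platform_secret", 2),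
         ("test_secret_key", 3), ("test_sk", 4), ("secret_key", 5), ("sk", 6)]
        ((rankDict mode).get?) (by rw [ht]; exact rank_test) (by decide)
      subst ht
      cases hB : bestOfF (rankDict "test").get? d.items with
      | none => rw [hB] at hb; simpa [aCandidates] using hb.symm ▸ rfl
      | some p => obtain ⟨s, r⟩ := p; rw [hB] at hb; simpa [aCandidates] using hb
    · have hb := bridge d hd
        [("platform_secret_key", 0), ("platform_sk", 1), ("platform_secret", 2),
         ("secret_key", 5), ("sk", 6)]
        ((rankDict mode).get?) (rank_other mode hl ht) (by decide)
      cases hB : bestOfF (rankDict mode).get? d.items with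
      | none => rw [hB] at hb; simpa [aCandidates, hl, ht] using hb.symm ▸ rfl
      | some p => obtain ⟨s, r⟩ := p; rw [hB] at hb; simpa [aCandidates, hl, ht] using hb

-- ===== VERDICT (by name: the statement is the Claim_ definition above) =====
theorem select_secret_py_spec : Claim_equal_select_secret_py := by
  intro keys _
  unfold Spec_select_secret_py
  rw [A_eq_bScan, B_eq_bScan]
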